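-- pv_equiv track=rewrite | github.com/Oppen-OC/CACM | Problemas/AdventuresInMovingIV/p10201.py | min_gas_cost
-- ===== SOURCE A (Python) =====
-- import heapq
--
-- def min_gas_cost(distance, stations):
--     stations.append((distance, 0))  # Add final destination as a "station" with zero cost
--
--     fuel_capacity = 200  # Maximum tank capacity
--     fuel = 100  # Starts with 100 litres (half tank)
--     cost = 0  # Total cost
--     position = 0  # Current location
--     min_heap = []  # Min-heap for gas prices (stores price per litre)
--
--     for station_distance, price in stations:
--         needed_fuel = station_distance - position  # Fuel required to reach this station
--
--         while fuel < needed_fuel:  # If we can't reach the next station, buy fuel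
--             if not min_heap:  # No cheaper fuel available -> Impossible
--                 return "Impossible"
--
--             cheapest_price = heapq.heappop(min_heap)  # Buy from cheapest available station
--             fuel_to_buy = min(fuel_capacity - fuel, needed_fuel)  # Buy just enough to reach next stop
--             cost += cheapest_price * fuel_to_buy  # Update cost
--             fuel += fuel_to_buy  # Refill fuel
--
--         fuel -= needed_fuel  # Travel to the station
--         position = station_distance
--         heapq.heappush(min_heap, price)  # Store price for future use
--
--     return str(cost)
-- ===== SOURCE B (Python) =====
-- def min_gas_cost(distance, stations):
--     stations.append((distance, 0))  # Add final destination as a "station" with zero cost (same mutation as A)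
--
--     fuel_capacity = 200
--     fuel = 100
--     cost = 0
--     position = 0
--     available = []  # plain list of prices seen so far; cheapest found by a linear scan
--
--     for station_distance, price in stations:
--         needed_fuel = station_distance - position
--
--         while fuel < needed_fuel:
--             if not available:
--                 return "Impossible"
--             cheapest = min(available)
--             available.remove(cheapest)
--             fuel_to_buy = min(fuel_capacity - fuel, needed_fuel)
--             cost += cheapest * fuel_to_buy
--             fuel += fuel_to_buy
--
--         fuel -= needed_fuel
--         position = station_distance
--         available.append(price)
--
--     return str(cost)
-- ===== Notes on version B (the rewrite author's own statement) =====
-- stated objective: simpler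
-- what changed: The heapq min-heap is replaced by a plain unordered list of prices: the cheapest price is found by a linear min scan and consumed with list.remove, eliminating the heap invariant maintenance.
import Mathlib
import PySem

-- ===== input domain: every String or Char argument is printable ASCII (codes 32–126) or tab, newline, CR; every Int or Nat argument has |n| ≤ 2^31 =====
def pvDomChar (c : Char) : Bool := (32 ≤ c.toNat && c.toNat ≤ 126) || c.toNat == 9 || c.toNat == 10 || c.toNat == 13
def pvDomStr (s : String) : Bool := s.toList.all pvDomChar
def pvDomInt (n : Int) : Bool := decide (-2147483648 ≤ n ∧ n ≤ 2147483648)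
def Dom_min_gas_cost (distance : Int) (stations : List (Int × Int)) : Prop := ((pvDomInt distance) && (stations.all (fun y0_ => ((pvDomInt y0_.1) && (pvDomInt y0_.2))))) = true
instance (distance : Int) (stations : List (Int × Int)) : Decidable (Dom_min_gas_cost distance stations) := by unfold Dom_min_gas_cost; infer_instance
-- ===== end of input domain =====

-- B replaces A's heapq min-heap by a plain price list scanned with min/remove (objective: simpler).
-- Both A and B append (distance, 0) to the caller's stations list; the claim is about the return value.

-- ===== PORT A =====
-- A's heap of Int prices is modelled as a sorted list: heappush = ordered insert, heappop = take the head.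
def heapPush : List Int → Int → List Int
  | [], x => [x]
  | y :: ys, x => if x ≤ y then x :: y :: ys else y :: heapPush ys x

-- the inner `while fuel < needed_fuel` loop; none = the `return "Impossible"` branch
def buyA (needed : Int) (fuel cost : Int) (heap : List Int) : Option (Int × Int × List Int) :=
  if fuel < needed then
    match heap with
    | [] => none
    | c :: rest =>
      buyA needed (fuel + min (200 - fuel) needed) (cost + c * min (200 - fuel) needed) rest
  else some (fuel, cost, heap)
termination_by heap.length

-- the outer `for station_distance, price in stations` loop
def loopA : List (Int × Int) → Int → Int → Int → List Int → String
  | [], _, cost, _, _ => PySem.Int.toStr cost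
  | (sd, p) :: rest, fuel, cost, position, heap =>
    match buyA (sd - position) fuel cost heap with
    | none => "Impossible"
    | some (f, c, h) => loopA rest (f - (sd - position)) c sd (heapPush h p)

def min_gas_cost (distance : Int) (stations : List (Int × Int)) : String :=
  loopA (stations ++ [(distance, 0)]) 100 0 0 []

-- ===== PORT B =====
-- B-side length lemma needed for termination of buyB
theorem remove?_length_lt {xs rest : List Int} {v : Int}
    (h : PySem.List.remove? xs v = some rest) : rest.length < xs.length := by
  induction xs generalizing rest with
  | nil => simp [PySem.List.remove?] at h
  | cons x xs ih =>
    by_cases hx : x = v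
    · subst hx; rw [PySem.List.remove?_cons_self] at h
      cases h; simp
    · rw [PySem.List.remove?_cons_of_ne xs hx] at h
      cases hr : PySem.List.remove? xs v with
      | none => rw [hr] at h; simp at h
      | some r => rw [hr] at h; simp at h
                  subst h; simpa using Nat.succ_lt_succ (ih hr)

-- the inner while loop of B: min(available) by a linear scan, then list.remove
def buyB (needed : Int) (fuel cost : Int) (avail : List Int) : Option (Int × Int × List Int) :=
  if fuel < needed then
    match PySem.List.min? avail (fun x => x) with
    | none => none      -- `if not available: return "Impossible"` (min? is none iff the list is empty)
    | some cheapest =>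
      match hrem : PySem.List.remove? avail cheapest with
      | none => none    -- unreachable: cheapest ∈ avail
      | some rest =>
        buyB needed (fuel + min (200 - fuel) needed)
          (cost + cheapest * min (200 - fuel) needed) rest
  else some (fuel, cost, avail)
termination_by avail.length
decreasing_by exact remove?_length_lt hrem

def loopB : List (Int × Int) → Int → Int → Int → List Int → String
  | [], _, cost, _, _ => PySem.Int.toStr cost
  | (sd, p) :: rest, fuel, cost, position, avail =>
    match buyB (sd - position) fuel cost avail with
    | none => "Impossible"
    | some (f, c, l) => loopB rest (f - (sd - position)) c sd (l ++ [p])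

def min_gas_cost_alt (distance : Int) (stations : List (Int × Int)) : String :=
  loopB (stations ++ [(distance, 0)]) 100 0 0 []

-- ===== PRECONDITION & SPEC =====
def Spec_min_gas_cost (distance : Int) (stations : List (Int × Int)) (out : String) : Prop := out = min_gas_cost_alt distance stations
instance (distance : Int) (stations : List (Int × Int)) (out : String) : Decidable (Spec_min_gas_cost distance stations out) := by unfold Spec_min_gas_cost; infer_instance

-- ===== CLAIM (what is proved, stated in full; the proofs are below) =====
def Claim_equal_min_gas_cost : Prop := ∀ (distance : Int) (stations : List (Int × Int)), Dom_min_gas_cost distance stations → Spec_min_gas_cost distance stations (min_gas_cost distance stations)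

-- ===== LEMMAS AND PROOFS =====

theorem min?_nil_int : PySem.List.min? ([] : List Int) (fun x => x) = none :=
  (PySem.List.min?_eq_none_iff _ _).mpr rfl

theorem heapPush_perm (h : List Int) (x : Int) : (heapPush h x).Perm (x :: h) := by
  induction h with
  | nil => simp [heapPush]
  | cons y ys ih =>
    simp only [heapPush]
    split
    · exact List.Perm.refl _
    · exact (List.Perm.cons y ih).trans (List.Perm.swap x y ys)

theorem heapPush_sorted {h : List Int} (hs : h.Sorted (· ≤ ·)) (x : Int) :
    (heapPush h x).Sorted (· ≤ ·) := by
  induction h with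
  | nil => simp [heapPush, List.sorted_singleton]
  | cons y ys ih =>
    simp only [heapPush]
    rcases List.sorted_cons.mp hs with ⟨hy, hys⟩
    split
    · rename_i hxy
      refine List.sorted_cons.mpr ⟨?_, hs⟩
      intro b hb
      rcases List.mem_cons.mp hb with rfl | hb
      · exact hxy
      · exact le_trans hxy (hy b hb)
    · rename_i hxy
      refine List.sorted_cons.mpr ⟨?_, ih hys⟩
      intro b hb
      rcases List.mem_cons.mp ((heapPush_perm ys x).mem_iff.mp hb) with rfl | hb
      · omega
      · exact hy b hb

-- sorted + perm ⇒ Python's min of the unordered list is the head of the sorted heap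
theorem min?_of_perm_sorted {c : Int} {t avail : List Int}
    (hp : (c :: t).Perm avail) (hs : (c :: t).Sorted (· ≤ ·)) :
    PySem.List.min? avail (fun x => x) = some c := by
  cases havail : PySem.List.min? avail (fun x => x) with
  | none =>
    have : avail = [] := (PySem.List.min?_eq_none_iff _ _).mp havail
    subst this; exact absurd hp.length_eq (by simp)
  | some m =>
    have hmem : m ∈ avail := PySem.List.min?_mem havail
    have hmin : ∀ y ∈ avail, m ≤ y := fun y hy => PySem.List.min?_isMin havail y hy
    have hcle : c ≤ m := by
      rcases List.mem_cons.mp (hp.mem_iff.mpr hmem) with heq | h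
      · omega
      · exact (List.sorted_cons.mp hs).1 m h
    have hmle : m ≤ c := hmin c (hp.mem_iff.mp (by simp))
    rw [le_antisymm hmle hcle]

theorem buyB_nil_none {needed fuel cost : Int} (hf : fuel < needed) :
    buyB needed fuel cost [] = none := by
  rw [buyB.eq_def, if_pos hf]
  split
  · rfl
  · rename_i cheapest hsome
    rw [min?_nil_int] at hsome; cases hsome

-- inner-loop equivalence: same fuel/cost, heaps stay permutations, A's heap stays sorted
theorem buy_eq (needed : Int) :
    ∀ n (heap avail : List Int), heap.length ≤ n → heap.Perm avail →
    heap.Sorted (· ≤ ·) → ∀ fuel cost,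
    (buyA needed fuel cost heap = none ∧ buyB needed fuel cost avail = none) ∨
    (∃ f c h l, buyA needed fuel cost heap = some (f, c, h) ∧
      buyB needed fuel cost avail = some (f, c, l) ∧ h.Perm l ∧ h.Sorted (· ≤ ·)) := by
  intro n
  induction n with
  | zero =>
    intro heap avail hlen hp hs fuel cost
    have h0 : heap = [] := List.length_eq_zero_iff.mp (Nat.le_zero.mp hlen)
    subst h0
    have ha : avail = [] := hp.symm.eq_nil
    subst ha
    by_cases hf : fuel < needed
    · exact Or.inl ⟨by rw [buyA.eq_def, if_pos hf], buyB_nil_none hf⟩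
    · exact Or.inr ⟨fuel, cost, [], [], by rw [buyA.eq_def, if_neg hf],
        by rw [buyB.eq_def, if_neg hf], List.Perm.refl _, List.Pairwise.nil⟩
  | succ n ih =>
    intro heap avail hlen hp hs fuel cost
    by_cases hf : fuel < needed
    · cases heap with
      | nil =>
        have ha : avail = [] := hp.symm.eq_nil
        subst ha
        exact Or.inl ⟨by rw [buyA.eq_def, if_pos hf], buyB_nil_none hf⟩
      | cons c t =>
        have hmin : PySem.List.min? avail (fun x => x) = some c := min?_of_perm_sorted hp hs
        have hcmem : c ∈ avail := hp.mem_iff.mp (by simp)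
        have hrem0 : PySem.List.remove? avail c = some (avail.erase c) :=
          PySem.List.remove?_eq_some_erase avail c hcmem
        have hperm' : t.Perm (avail.erase c) := by
          have := hp.erase c
          simpa using this
        have hrec := ih t (avail.erase c) (by simpa using Nat.lt_succ_iff.mp (by simpa using hlen))
          hperm' (List.sorted_cons.mp hs).2
          (fuel + min (200 - fuel) needed) (cost + c * min (200 - fuel) needed)
        have hBstep : buyB needed fuel cost avail =
            buyB needed (fuel + min (200 - fuel) needed)
              (cost + c * min (200 - fuel) needed) (avail.erase c) := by
          rw [buyB.eq_def, if_pos hf]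
          split
          · rename_i hnone; rw [hmin] at hnone; cases hnone
          · rename_i cheapest hsome
            rw [hmin] at hsome
            cases hsome
            split
            · rename_i hnone; rw [hrem0] at hnone; cases hnone
            · rename_i rest hsome2
              rw [hrem0] at hsome2
              cases hsome2
              rfl
        have hAstep : buyA needed fuel cost (c :: t) =
            buyA needed (fuel + min (200 - fuel) needed)
              (cost + c * min (200 - fuel) needed) t := by
          rw [buyA.eq_def, if_pos hf]
        rcases hrec with ⟨h1, h2⟩ | ⟨f, cc, h, l, h1, h2, h3, h4⟩
        · exact Or.inl ⟨hAstep.trans h1, hBstep.trans h2⟩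
        · exact Or.inr ⟨f, cc, h, l, hAstep.trans h1, hBstep.trans h2, h3, h4⟩
    · exact Or.inr ⟨fuel, cost, heap, avail, by rw [buyA.eq_def, if_neg hf],
        by rw [buyB.eq_def, if_neg hf], hp, hs⟩

theorem loop_eq (stations : List (Int × Int)) :
    ∀ fuel cost position (heap avail : List Int), heap.Perm avail →
    heap.Sorted (· ≤ ·) →
    loopA stations fuel cost position heap = loopB stations fuel cost position avail := by
  induction stations with
  | nil => intro _ _ _ _ _ _ _; rfl
  | cons sp rest ih =>
    intro fuel cost position heap avail hp hs
    obtain ⟨sd, p⟩ := sp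
    rcases buy_eq (sd - position) heap.length heap avail le_rfl hp hs fuel cost with
      ⟨h1, h2⟩ | ⟨f, c, h, l, h1, h2, h3, h4⟩
    · simp [loopA, loopB, h1, h2]
    · simp only [loopA, loopB, h1, h2]
      exact ih (f - (sd - position)) c sd (heapPush h p) (l ++ [p])
        ((heapPush_perm h p).trans ((h3.cons p).trans (List.perm_append_comm (l₁ := [p]) (l₂ := l))))
        (heapPush_sorted h4 p)

-- ===== VERDICT (by name: the statement is the Claim_ definition above) =====
theorem min_gas_cost_spec : Claim_equal_min_gas_cost := by
  intro distance stations _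
  unfold Spec_min_gas_cost min_gas_cost min_gas_cost_alt
  exact loop_eq (stations ++ [(distance, 0)]) 100 0 0 [] [] (List.Perm.refl _) List.Pairwise.nil
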